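-- pv_equiv track=rewrite | github.com/jcolinpatrick/kryptos | scripts/transposition/columnar/e_k4_double_columnar_rtl.py | columnar_rtl_encrypt
-- ===== SOURCE A (Python) =====
-- import math
--
-- def columnar_rtl_encrypt(text: str, width: int) -> str:
--     """Columnar transposition: write in rows of width, read columns RIGHT-TO-LEFT.
--
--     This is the ENCRYPTION direction (what Sanborn did to create the ciphertext).
--     """
--     length = len(text)
--     nrows = math.ceil(length / width)
--
--     # Write text in rows
--     grid = {}
--     for i, ch in enumerate(text):
--         r, c = divmod(i, width)
--         grid[(r, c)] = ch
--
--     # Read columns right-to-left (col width-1, width-2, ..., 0)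
--     result = []
--     for c in range(width - 1, -1, -1):
--         for r in range(nrows):
--             if (r, c) in grid:
--                 result.append(grid[(r, c)])
--
--     return "".join(result)
-- ===== SOURCE B (Python) =====
-- def columnar_rtl_encrypt(text: str, width: int) -> str:
--     # Columns of the row-major grid are exactly the stride-width slices of text,
--     # so read them directly, right-to-left.
--     return "".join(text[c::width] for c in range(width - 1, -1, -1))
-- ===== Notes on version B (the rewrite author's own statement) =====
-- stated objective: faster
-- what changed: Replaces the (row,col)-keyed grid dict and the per-cell nested read loop with direct per-column extraction via the stride slice text[c::width], joined right-to-left.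
import Mathlib
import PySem

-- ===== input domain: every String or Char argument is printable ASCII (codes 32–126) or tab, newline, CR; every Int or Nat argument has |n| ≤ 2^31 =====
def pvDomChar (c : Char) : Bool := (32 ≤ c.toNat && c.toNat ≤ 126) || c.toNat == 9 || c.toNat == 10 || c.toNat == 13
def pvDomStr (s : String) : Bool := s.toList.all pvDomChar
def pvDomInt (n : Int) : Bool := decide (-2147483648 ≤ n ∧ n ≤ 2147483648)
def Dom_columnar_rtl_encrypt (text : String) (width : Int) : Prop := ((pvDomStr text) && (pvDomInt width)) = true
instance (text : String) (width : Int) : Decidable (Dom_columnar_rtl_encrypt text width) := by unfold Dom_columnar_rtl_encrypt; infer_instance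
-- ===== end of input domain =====

-- B replaces A's (row,col)-keyed grid dict and nested read loop with direct
-- per-column stride-slice extraction (text[c::width]), joined right-to-left;
-- return values proved equal for every width ≠ 0.

-- ===== PORT A =====
-- math.ceil(length / width): exact as integer ceiling division here (the float
-- quotient of |len|, |width| ≤ 2^31 is fine-grained enough that its ceil is exact).
def pvCeil (a b : Int) : Int := -(PySem.Int.floordiv (-a) b)

-- the 'grid' dict of A: grid[(i // width, i % width)] = ch for i, ch in enumerate(text)
def pvGrid (chars : List Char) (width : Int) : PySem.Dict (Int × Int) Char :=
  (PySem.List.enumerate chars 0).foldl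
    (fun g p => g.insert (PySem.Int.floordiv p.1 width, PySem.Int.mod p.1 width) p.2)
    PySem.Dict.empty

def columnar_rtl_encrypt (text : String) (width : Int) : String :=
  let chars := text.toList
  let length : Int := (chars.length : Int)
  let nrows : Int := pvCeil length width
  let grid := pvGrid chars width
  let result : List Char :=
    (PySem.List.pyRange (width - 1) (-1) (-1)).foldl (fun res c =>
      (PySem.List.pyRange 0 nrows 1).foldl (fun res r =>
        match grid.get? (r, c) with       -- 'if (r, c) in grid: result.append(grid[(r, c)])'
        | some ch => res ++ [ch]
        | none => res) res) []
  String.ofList result                     -- "".join(result)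

-- ===== PORT B =====
def columnar_rtl_encrypt_alt (text : String) (width : Int) : String :=
  -- "".join(text[c::width] for c in range(width - 1, -1, -1)); the slice is only
  -- evaluated for c in the range, where width ≥ 1, so slice? is always some there.
  String.ofList ((PySem.List.pyRange (width - 1) (-1) (-1)).flatMap
    (fun c => (PySem.List.slice? text.toList (some c) none width).getD []))

-- ===== PRECONDITION & SPEC =====
-- Pre_ excludes exactly width = 0, where A raises ZeroDivisionError in math.ceil(length/width).
def Pre_columnar_rtl_encrypt (text : String) (width : Int) : Prop := width ≠ 0
instance (text : String) (width : Int) : Decidable (Pre_columnar_rtl_encrypt text width) := by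
  unfold Pre_columnar_rtl_encrypt; infer_instance

def pvWitness_columnar_rtl_encrypt : String × Int := ("HELLOWORLD", 3)

def Spec_columnar_rtl_encrypt (text : String) (width : Int) (out : String) : Prop := out = columnar_rtl_encrypt_alt text width
instance (text : String) (width : Int) (out : String) : Decidable (Spec_columnar_rtl_encrypt text width out) := by unfold Spec_columnar_rtl_encrypt; infer_instance

-- ===== CLAIM (what is proved, stated in full; the proofs are below) =====
def Claim_equal_columnar_rtl_encrypt : Prop := ∀ (text : String) (width : Int), Dom_columnar_rtl_encrypt text width → Pre_columnar_rtl_encrypt text width → Spec_columnar_rtl_encrypt text width (columnar_rtl_encrypt text width)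

-- ===== LEMMAS AND PROOFS =====

-- grid lookup: for 0 ≤ r and 0 ≤ c < width, grid[(r,c)] is the character at flat index r*width+c
theorem pvGrid_get? (chars : List Char) (w r c : Int) (hw : 0 < w) (hr : 0 ≤ r)
    (hc : 0 ≤ c) (hcw : c < w) :
    (pvGrid chars w).get? (r, c) = chars[(r * w + c).toNat]? := by
  induction chars using List.reverseRecOn with
  | nil => simp [pvGrid, PySem.List.enumerate, PySem.Dict.get?, PySem.Dict.empty]
  | append_singleton ys x ih =>
    have hfold : pvGrid (ys ++ [x]) w
        = (pvGrid ys w).insert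
            (PySem.Int.floordiv (ys.length : Int) w, PySem.Int.mod (ys.length : Int) w) x := by
      simp [pvGrid, PySem.List.enumerate_append, PySem.List.enumerate, List.foldl_append]
    rw [hfold]
    set m : Int := (ys.length : Int) with hm
    have hdm : PySem.Int.floordiv m w * w + PySem.Int.mod m w = m :=
      PySem.Int.floordiv_mul_add_mod m w
    have hmodlo : 0 ≤ PySem.Int.mod m w := PySem.Int.mod_nonneg m hw
    have hmodhi : PySem.Int.mod m w < w := PySem.Int.mod_lt m hw
    by_cases hkey : (r, c) = (PySem.Int.floordiv m w, PySem.Int.mod m w)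
    · -- key matches: r*w+c = m
      obtain ⟨hr1, hc1⟩ : r = PySem.Int.floordiv m w ∧ c = PySem.Int.mod m w := by
        simpa [Prod.ext_iff] using hkey
      rw [hkey, PySem.Dict.get?_insert_self]
      have hidx : r * w + c = m := by rw [hr1, hc1]; exact hdm
      have : (r * w + c).toNat = ys.length := by omega
      rw [this, List.getElem?_concat_length]
    · rw [PySem.Dict.get?_insert_of_ne _ x hkey, ih]
      -- indices must differ: r*w+c ≠ m
      have hne : r * w + c ≠ m := by
        intro habs
        apply hkey
        -- uniqueness of divmod
        have hq : r = PySem.Int.floordiv m w := by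
          rcases lt_trichotomy r (PySem.Int.floordiv m w) with h | h | h
          · exfalso
            have : (r + 1) * w ≤ PySem.Int.floordiv m w * w :=
              mul_le_mul_of_nonneg_right (by omega) (le_of_lt hw)
            nlinarith
          · exact h
          · exfalso
            have : (PySem.Int.floordiv m w + 1) * w ≤ r * w :=
              mul_le_mul_of_nonneg_right (by omega) (le_of_lt hw)
            nlinarith
        have hc2 : c = PySem.Int.mod m w := by nlinarith [hq]
        rw [hq, hc2]
      have hlt : (r * w + c).toNat < ys.length ∨ ys.length < (r * w + c).toNat ∨ ((r*w+c) < 0) := by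
        omega
      rcases hlt with h | h | h
      · rw [List.getElem?_append_left h]
      · have hlen : (ys ++ [x]).length = ys.length + 1 := by simp
        rw [List.getElem?_eq_none (by omega), List.getElem?_eq_none (by omega)]
      · exfalso; nlinarith

-- a flatMap of option-toList is a filterMap
theorem pvFlatMap_toList {α β : Type} (l : List α) (f : α → Option β) :
    l.flatMap (fun r => (f r).toList) = l.filterMap f := by
  induction l with
  | nil => rfl
  | cons x t ih =>
    simp only [List.flatMap_cons, List.filterMap_cons, ih]
    cases f x <;> simp

-- filterMap over range is insensitive to extending the range past where g is none
theorem pvFilterMap_range_ext {β : Type} (g : Nat → Option β) (m N : Nat) (hmN : m ≤ N)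
    (h : ∀ k, m ≤ k → g k = none) :
    (List.range m).filterMap g = (List.range N).filterMap g := by
  have hN : N = m + (N - m) := by omega
  rw [hN, List.range_add, List.filterMap_append]
  have h2 : (List.filterMap g (List.map (fun i => m + i) (List.range (N - m)))) = [] := by
    simp only [List.filterMap_map, List.filterMap_eq_nil_iff]
    intro k _
    exact h (m + k) (by omega)
  simp [h2]

theorem pvColumn_eq (chars : List Char) (w c : Int) (hw : 0 < w) (hc : 0 ≤ c) (hcw : c < w) :
    (PySem.List.pyRange 0 (pvCeil (chars.length : Int) w) 1).filterMap
        (fun r => chars[(r * w + c).toNat]?)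
      = (PySem.List.slice? chars (some c) none w).getD [] := by
  set nI : Int := (chars.length : Int) with hnI
  set nrows : Int := pvCeil nI w with hnr
  have hceil : (nrows - 1) * w < nI ∧ nI ≤ nrows * w :=
    (PySem.Int.neg_floordiv_neg_eq_iff_of_pos hw).mp rfl
  set F : Nat → Option Char := fun k => chars[(c + w * (k:Int)).toNat]? with hF
  -- LHS to filterMap F over range nrows.toNat
  have hlhs : (PySem.List.pyRange 0 nrows 1).filterMap (fun r => chars[(r * w + c).toNat]?)
      = (List.range nrows.toNat).filterMap F := by
    rw [PySem.List.pyRange_one, List.filterMap_map, show nrows - 0 = nrows from sub_zero nrows]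
    apply List.filterMap_congr
    intro k _
    simp only [Function.comp, hF]
    congr 2
    ring
  rw [hlhs]
  -- unfold slice?
  simp only [PySem.List.slice?]
  have hsi : PySem.List.sliceIndices chars.length (some c) none w = (min c nI, nI, w) := by
    simp [PySem.List.sliceIndices, not_lt.mpr (le_of_lt hw), not_lt.mpr hc, hnI]
  rw [hsi]
  simp only [if_neg (by omega : ¬ w = 0), hw, if_pos hw, Option.getD_some]
  by_cases hcn : c < nI
  · have hmin : min c nI = c := min_eq_left (le_of_lt hcn)
    rw [hmin]
    rw [if_pos hcn]
    set q : Int := (nI - c + w - 1) / w with hq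
    have hqe := Int.ediv_add_emod (nI - c + w - 1) w
    have hre1 : 0 ≤ (nI - c + w - 1) % w := Int.emod_nonneg _ (by omega)
    have hre2 : (nI - c + w - 1) % w < w := Int.emod_lt_of_pos _ hw
    have hq0 : 0 ≤ q := by
      by_contra hneg
      push_neg at hneg
      have h2 : w * q ≤ -w := by nlinarith
      linarith
    have hqw : nI - c ≤ q * w := by nlinarith
    have htail : ∀ k, q.toNat ≤ k → F k = none := by
      intro k hk
      apply List.getElem?_eq_none
      have : (q.toNat : Int) ≤ (k : Int) := by exact_mod_cast hk
      have h1 : q * w ≤ w * (k:Int) := by nlinarith [show q ≤ (k:Int) by omega]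
      omega
    have htailn : ∀ k, nrows.toNat ≤ k → F k = none := by
      intro k hk
      apply List.getElem?_eq_none
      have h0 : nrows ≤ (k : Int) := by
        have : (nrows.toNat : Int) ≤ (k : Int) := by exact_mod_cast hk
        omega
      have h1 : nrows * w ≤ w * (k:Int) := by nlinarith
      omega
    have h1 : (List.range nrows.toNat).filterMap F
        = (List.range (max nrows.toNat q.toNat)).filterMap F :=
      pvFilterMap_range_ext F _ _ (le_max_left _ _) htailn
    have h2 : (List.range q.toNat).filterMap F
        = (List.range (max nrows.toNat q.toNat)).filterMap F :=
      pvFilterMap_range_ext F _ _ (le_max_right _ _) htail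
    rw [h1, ← h2]
    simp only [if_true]
    rfl
  · have hmin : min c nI = nI := min_eq_right (by omega)
    rw [hmin]
    simp only [if_true, lt_irrefl, if_false, List.range_zero, List.filterMap_nil]
    apply List.filterMap_eq_nil_iff.mpr
    intro k _
    apply List.getElem?_eq_none
    have hk0 : 0 ≤ w * (k:Int) := by positivity
    omega

-- ===== VERDICT (by name: the statement is the Claim_ definition above) =====
theorem columnar_rtl_encrypt_spec : Claim_equal_columnar_rtl_encrypt := by
  intro text width _ hw0
  unfold Spec_columnar_rtl_encrypt columnar_rtl_encrypt columnar_rtl_encrypt_alt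
  simp only []
  rcases lt_or_gt_of_ne (hw0 : width ≠ 0) with hneg | hw
  · -- width < 0: the reversed column range is empty on both sides
    rw [PySem.List.pyRange_neg_one_eq_nil (by omega : width - 1 ≤ -1)]
    simp
  · -- width ≥ 1
    set chars := text.toList with hch
    set nrows : Int := pvCeil (chars.length : Int) width with hnr
    have houter :
        (PySem.List.pyRange (width - 1) (-1) (-1)).foldl (fun res c =>
            (PySem.List.pyRange 0 nrows 1).foldl (fun res r =>
              match (pvGrid chars width).get? (r, c) with
              | some ch => res ++ [ch]
              | none => res) res) []
          = (PySem.List.pyRange (width - 1) (-1) (-1)).foldl (fun res c =>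
              res ++ (PySem.List.slice? chars (some c) none width).getD []) [] := by
      apply PySem.List.foldl_congr_mem
      intro acc c hcmem
      obtain ⟨hc1, hc2⟩ := (PySem.List.mem_pyRange_neg_one).mp hcmem
      have hc0 : 0 ≤ c := by omega
      have hcw : c < width := by omega
      have hinner :
          (PySem.List.pyRange 0 nrows 1).foldl (fun res r =>
              match (pvGrid chars width).get? (r, c) with
              | some ch => res ++ [ch]
              | none => res) acc
            = (PySem.List.pyRange 0 nrows 1).foldl (fun res r =>
                res ++ (chars[(r * width + c).toNat]?).toList) acc := by
        apply PySem.List.foldl_congr_mem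
        intro acc2 r hrmem
        have hr0 : 0 ≤ r := ((PySem.List.mem_pyRange_one).mp hrmem).1
        rw [pvGrid_get? chars width r c hw hr0 hc0 hcw]
        cases chars[(r * width + c).toNat]? <;> simp
      rw [hinner, PySem.List.foldl_append_eq_flatMap, pvFlatMap_toList,
        pvColumn_eq chars width c hw hc0 hcw]
    rw [houter, PySem.List.foldl_append_eq_flatMap]
    simp
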